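-- pv_equiv track=rewrite | github.com/sudo-gera/c | led.py | check_rev_v
-- ===== SOURCE A (Python) =====
-- def check_rev_v(q):
-- 	for w in range(len(q)):
-- 		if q[w]=='2':
-- 			if q[-1-w]!='5':
-- 				return 0
-- 		elif q[w]=='5':
-- 			if q[-1-w]!='2':
-- 				return 0
-- 		elif q[w]=='0':
-- 			if q[-1-w]!='0':
-- 				return 0
-- 		elif q[w]=='8':
-- 			if q[-1-w]!='8':
-- 				return 0
-- 		else:
-- 			return 0
-- 	return 1;
-- ===== SOURCE B (Python) =====
-- MIRROR = {'2': '5', '5': '2', '0': '0', '8': '8'}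
--
-- def check_rev_v(q):
--     if any(c not in MIRROR for c in q):
--         return 0
--     return 1 if ''.join(MIRROR[c] for c in q) == q[::-1] else 0
-- ===== Notes on version B (the rewrite author's own statement) =====
-- stated objective: simpler
-- what changed: Replaces A's per-index early-return loop comparing q[w] with the negatively-indexed q[-1-w] by a whole-string transform: map every character through the mirror dict and compare the mapped string to the reversal of q.
import Mathlib
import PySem

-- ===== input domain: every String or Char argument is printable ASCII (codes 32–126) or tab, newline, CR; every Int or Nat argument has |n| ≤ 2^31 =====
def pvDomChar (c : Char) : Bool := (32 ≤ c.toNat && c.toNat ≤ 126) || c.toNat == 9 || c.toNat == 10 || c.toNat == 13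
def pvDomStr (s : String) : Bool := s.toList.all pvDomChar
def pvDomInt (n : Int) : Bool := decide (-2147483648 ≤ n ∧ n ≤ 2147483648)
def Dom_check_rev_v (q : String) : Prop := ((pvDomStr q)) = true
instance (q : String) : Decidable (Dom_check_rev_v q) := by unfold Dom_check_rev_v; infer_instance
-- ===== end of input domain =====

-- B changes the decomposition (transform the whole string, compare with the reversal); same return value, no speed claim.

-- ===== PORT A =====
-- literal port of A's loop: for w in range(len(q)), compare q[w] against q[-1-w]
-- (for 0 ≤ w < len q, q[-1-w] is q[len q - 1 - w]); early return 0, final return 1.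
def check_rev_v_go (l : List Char) (w : Nat) : Int :=
  if h : w < l.length then
    if l[w] = '2' then
      (if l[l.length - 1 - w]'(by omega) ≠ '5' then 0 else check_rev_v_go l (w + 1))
    else if l[w] = '5' then
      (if l[l.length - 1 - w]'(by omega) ≠ '2' then 0 else check_rev_v_go l (w + 1))
    else if l[w] = '0' then
      (if l[l.length - 1 - w]'(by omega) ≠ '0' then 0 else check_rev_v_go l (w + 1))
    else if l[w] = '8' then
      (if l[l.length - 1 - w]'(by omega) ≠ '8' then 0 else check_rev_v_go l (w + 1))
    else 0
  else 1
termination_by l.length - w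

def check_rev_v (q : String) : Int := check_rev_v_go q.toList 0

-- ===== PORT B =====
-- MIRROR.get c (none means 'c not in MIRROR')
def pvMirror? (c : Char) : Option Char :=
  if c = '2' then some '5'
  else if c = '5' then some '2'
  else if c = '0' then some '0'
  else if c = '8' then some '8'
  else none

def check_rev_v_alt (q : String) : Int :=
  if q.toList.any (fun c => (pvMirror? c).isNone) then 0
  else if q.toList.map (fun c => (pvMirror? c).getD c) = q.toList.reverse then 1 else 0

-- ===== PRECONDITION & SPEC =====
def Spec_check_rev_v (q : String) (out : Int) : Prop := out = check_rev_v_alt q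
instance (q : String) (out : Int) : Decidable (Spec_check_rev_v q out) := by unfold Spec_check_rev_v; infer_instance

-- ===== CLAIM (what is proved, stated in full; the proofs are below) =====
def Claim_equal_check_rev_v : Prop := ∀ (q : String), Dom_check_rev_v q → Spec_check_rev_v q (check_rev_v q)

-- ===== LEMMAS AND PROOFS =====

-- the shared characterisation: every position from w on is mirror-matched to its opposite
def pvCond (l : List Char) (w : Nat) : Prop :=
  ∀ i, (h : i < l.length) → w ≤ i → pvMirror? l[i] = some (l[l.length - 1 - i]'(by omega))

-- A's branch chain at one position, re-read through the mirror map
theorem go_unfold (l : List Char) (w : Nat) (h : w < l.length) :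
    check_rev_v_go l w =
      (match pvMirror? l[w] with
       | none => 0
       | some m =>
         if (l[l.length - 1 - w]'(by omega)) = m then check_rev_v_go l (w + 1) else 0) := by
  rw [check_rev_v_go]
  simp only [dif_pos h, pvMirror?]
  split_ifs <;> simp_all

theorem pvCond_succ (l : List Char) (w : Nat) (h : w < l.length)
    (hw : pvMirror? l[w] = some (l[l.length - 1 - w]'(by omega))) :
    pvCond l w ↔ pvCond l (w + 1) := by
  constructor
  · intro hc i hi hwi; exact hc i hi (by omega)
  · intro hc i hi hwi
    rcases Nat.eq_or_lt_of_le hwi with rfl | hlt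
    · exact hw
    · exact hc i hi hlt

theorem go_eq_one_iff_aux : ∀ (n : Nat) (l : List Char) (w : Nat), l.length ≤ w + n →
    (check_rev_v_go l w = 1 ↔ pvCond l w) := by
  intro n
  induction n with
  | zero =>
    intro l w hle
    have h : ¬ w < l.length := by omega
    have hv : pvCond l w := fun i hi hwi => absurd hi (by omega)
    rw [check_rev_v_go]
    simp only [dif_neg h]
    exact iff_of_true trivial hv
  | succ n ih =>
    intro l w hle
    by_cases h : w < l.length
    · cases hmi : pvMirror? l[w] with
      | none =>
        simp only [go_unfold l w h, hmi]
        constructor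
        · intro he; exact absurd he (by omega)
        · intro hc; exact absurd (hc w h le_rfl) (by simp [hmi])
      | some m =>
        simp only [go_unfold l w h, hmi]
        by_cases hd : (l[l.length - 1 - w]'(by omega)) = m
        · rw [if_pos hd]
          rw [ih l (w + 1) (by omega)]
          exact (pvCond_succ l w h (by rw [hmi, hd])).symm
        · rw [if_neg hd]
          constructor
          · intro he; exact absurd he (by omega)
          · intro hc
            have := hc w h le_rfl
            rw [hmi] at this
            exact hd (by injection this with h'; exact h'.symm) |>.elim
    · have hv : pvCond l w := fun i hi hwi => absurd hi (by omega)
      rw [check_rev_v_go]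
      simp only [dif_neg h]
      exact iff_of_true trivial hv

theorem go_zero_or_one_aux : ∀ (n : Nat) (l : List Char) (w : Nat), l.length ≤ w + n →
    (check_rev_v_go l w = 0 ∨ check_rev_v_go l w = 1) := by
  intro n
  induction n with
  | zero =>
    intro l w hle
    rw [check_rev_v_go]
    have h : ¬ w < l.length := by omega
    simp [dif_neg h]
  | succ n ih =>
    intro l w hle
    by_cases h : w < l.length
    · cases hmi : pvMirror? l[w] with
      | none => simp only [go_unfold l w h, hmi]; exact Or.inl trivial
      | some m =>
        simp only [go_unfold l w h, hmi]
        by_cases hd : (l[l.length - 1 - w]'(by omega)) = m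
        · rw [if_pos hd]; exact ih l (w + 1) (by omega)
        · rw [if_neg hd]; exact Or.inl rfl
    · rw [check_rev_v_go]; simp [dif_neg h]

theorem alt_eq_one_iff (q : String) :
    check_rev_v_alt q = 1 ↔ pvCond q.toList 0 := by
  unfold check_rev_v_alt
  generalize q.toList = l
  constructor
  · intro he i hi _
    by_cases hany : l.any (fun c => (pvMirror? c).isNone)
    · simp [hany] at he
    · simp only [hany] at he
      have hmap : l.map (fun c => (pvMirror? c).getD c) = l.reverse := by
        by_contra hne; simp [hne] at he
      have hsome : (pvMirror? l[i]).isNone = false := by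
        rw [Bool.not_eq_true, List.any_eq_false] at hany
        exact Bool.not_eq_true _ ▸ hany _ (List.getElem_mem hi)
      have hm := congrArg (fun t => t[i]?) hmap
      simp only [List.getElem?_map] at hm
      rw [List.getElem?_eq_getElem hi, List.getElem?_eq_getElem (by simpa using hi)] at hm
      rw [List.getElem_reverse] at hm
      cases hmi : pvMirror? l[i] with
      | none => rw [hmi] at hsome; exact absurd hsome (by simp)
      | some m =>
        simp only [Option.map_some, hmi, Option.getD_some] at hm
        exact hm
  · intro hc
    have hany : l.any (fun c => (pvMirror? c).isNone) = false := by
      simp only [List.any_eq_false]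
      intro c hcmem
      obtain ⟨i, hi, rfl⟩ := List.mem_iff_getElem.mp hcmem
      have := hc i hi (Nat.zero_le _)
      simp [this]
    rw [hany]
    have hmap : l.map (fun c => (pvMirror? c).getD c) = l.reverse := by
      apply List.ext_getElem
      · simp
      · intro i h1 h2
        simp only [List.getElem_map, List.getElem_reverse]
        have := hc i (by simpa using h1) (Nat.zero_le _)
        simp [this]
    simp [hmap]

theorem alt_zero_or_one (q : String) :
    check_rev_v_alt q = 0 ∨ check_rev_v_alt q = 1 := by
  unfold check_rev_v_alt
  split_ifs <;> simp

-- ===== VERDICT (by name: the statement is the Claim_ definition above) =====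
theorem check_rev_v_spec : Claim_equal_check_rev_v := by
  intro q _
  unfold Spec_check_rev_v
  have hA1 := go_eq_one_iff_aux q.toList.length q.toList 0 (by omega)
  rcases go_zero_or_one_aux q.toList.length q.toList 0 (by omega) with hA | hA <;>
    rcases alt_zero_or_one q with hB | hB <;>
    unfold check_rev_v <;> rw [hA, hB]
  · exfalso
    have := hA1.mpr ((alt_eq_one_iff q).mp hB)
    rw [hA] at this; exact absurd this (by decide)
  · exfalso
    have := (alt_eq_one_iff q).mpr (hA1.mp hA)
    rw [hB] at this; exact absurd this (by decide)
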